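-- pv_equiv track=rewrite | github.com/jayasuryashaju/pythonDataScience | Weekly Assignments/WEEK_1/Q4.py | generate_identifiers
-- ===== SOURCE A (Python) =====
-- def generate_identifiers(n):
--     if n < 1:
--         return []
--     first_chars = "abcdefghijklmnopqrstuvwxyzABCDEFGHIJKLMNOPQRSTUVWXYZ_"
--     subsequent_chars = "abcdefghijklmnopqrstuvwxyzABCDEFGHIJKLMNOPQRSTUVWXYZ0123456789_"
--
--     identifiers = []
--     current_identifiers = list(first_chars)
--
--     for length in range(1, n):
--         next_identifiers = []
--         for identifier in current_identifiers:
--             for char in subsequent_chars: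
--                 next_identifiers.append(identifier + char)
--         current_identifiers = next_identifiers
--
--     return current_identifiers
-- ===== SOURCE B (Python) =====
-- def generate_identifiers(n):
--     if n < 1:
--         return []
--     first_chars = "abcdefghijklmnopqrstuvwxyzABCDEFGHIJKLMNOPQRSTUVWXYZ_"
--     subsequent_chars = "abcdefghijklmnopqrstuvwxyzABCDEFGHIJKLMNOPQRSTUVWXYZ0123456789_"
--
--     def tails(k):
--         # all strings of length k over subsequent_chars, lexicographic in
--         # subsequent_chars order (first position slowest)
--         if k == 0:
--             return [""]
--         rest = tails(k - 1)
--         return [c + t for c in subsequent_chars for t in rest]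
--
--     rest = tails(n - 1)
--     return [f + t for f in first_chars for t in rest]
-- ===== Notes on version B (the rewrite author's own statement) =====
-- stated objective: simpler
-- what changed: Replaced A's level-by-level frontier (rebuilding the whole list of prefixes each round by appending one character on the right) with a direct Cartesian-product construction: a recursive list of all length-(n-1) suffixes over subsequent_chars composed once with the first-character set via a comprehension.
import Mathlib
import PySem

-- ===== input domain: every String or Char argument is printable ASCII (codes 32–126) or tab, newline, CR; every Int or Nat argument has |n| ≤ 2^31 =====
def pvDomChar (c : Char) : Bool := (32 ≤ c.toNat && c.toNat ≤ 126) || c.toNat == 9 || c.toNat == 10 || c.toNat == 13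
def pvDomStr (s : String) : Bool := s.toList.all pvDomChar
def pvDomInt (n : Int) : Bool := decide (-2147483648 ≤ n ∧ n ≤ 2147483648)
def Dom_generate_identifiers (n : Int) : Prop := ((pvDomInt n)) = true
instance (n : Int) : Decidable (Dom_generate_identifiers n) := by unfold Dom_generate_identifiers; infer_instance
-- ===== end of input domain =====

-- B replaces A's level-by-level frontier of prefixes (extended on the right each
-- round) by a direct Cartesian-product construction: a recursive suffix list over
-- subsequent_chars composed once with the first-character set (objective: simpler).

def pvFirstChars : String := "abcdefghijklmnopqrstuvwxyzABCDEFGHIJKLMNOPQRSTUVWXYZ_"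
def pvSubChars : String := "abcdefghijklmnopqrstuvwxyzABCDEFGHIJKLMNOPQRSTUVWXYZ0123456789_"

-- ===== PORT A =====
-- for length in range(1, n): rebuild the frontier by appending each char on the right
def generate_identifiers (n : Int) : List String :=
  if n < 1 then []
  else
    let current := pvFirstChars.toList.map (fun c => c.toString)   -- list(first_chars)
    (PySem.List.pyRange 1 n 1).foldl
      (fun current _ =>
        current.foldl
          (fun next identifier =>
            pvSubChars.toList.foldl
              (fun next char => next ++ [identifier ++ char.toString]) next)
          [])
      current

-- ===== PORT B =====
-- tails k = all length-k strings over subsequent_chars (first position slowest)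
def pvTails (k : Nat) : List String :=
  match k with
  | 0 => [""]
  | k + 1 => pvSubChars.toList.flatMap (fun c => (pvTails k).map (fun t => c.toString ++ t))

def generate_identifiers_alt (n : Int) : List String :=
  if n < 1 then []
  else
    let rest := pvTails (n - 1).toNat
    pvFirstChars.toList.flatMap (fun f => rest.map (fun t => f.toString ++ t))

-- ===== PRECONDITION & SPEC =====
def Spec_generate_identifiers (n : Int) (out : List String) : Prop := out = generate_identifiers_alt n
instance (n : Int) (out : List String) : Decidable (Spec_generate_identifiers n out) := by unfold Spec_generate_identifiers; infer_instance

-- ===== CLAIM (what is proved, stated in full; the proofs are below) =====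
def Claim_equal_generate_identifiers : Prop := ∀ (n : Int), Dom_generate_identifiers n → Spec_generate_identifiers n (generate_identifiers n)

-- ===== LEMMAS AND PROOFS =====

theorem pvAppend_push (a b : String) (c : Char) : (a ++ b).push c = a ++ b.push c := by
  apply String.ext; simp

theorem pvEmpty_push (c : Char) : "".push c = String.singleton c := by
  apply String.ext; simp [String.singleton]

theorem pvFlatten_map_singleton {α β : Type} (f : α → β) (l : List α) :
    (l.map (fun a => [f a])).flatten = l.map f := by
  induction l <;> simp_all

-- one round of A's frontier rebuild, in flatMap form
def pvStep (L : List String) : List String :=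
  L.flatMap (fun s => pvSubChars.toList.map (fun c => s ++ c.toString))

theorem pvOuter_foldl (L acc : List String) :
    L.foldl
      (fun next s =>
        pvSubChars.toList.foldl (fun next c => next ++ [s ++ c.toString]) next) acc
      = acc ++ pvStep L := by
  induction L generalizing acc with
  | nil => simp [pvStep]
  | cons s L ih => simp [List.foldl, pvStep, pvFlatten_map_singleton, List.flatMap]

theorem pvFoldl_const_iterate {α β : Type} (f : α → α) (l : List β) (a : α) :
    l.foldl (fun x _ => f x) a = f^[l.length] a := by
  induction l generalizing a with
  | nil => rfl
  | cons b l ih => simp [List.foldl, ih, Function.iterate_succ_apply]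

theorem pvStep_map (f : String) (L : List String) :
    pvStep (L.map (fun t => f ++ t)) = (pvStep L).map (fun t => f ++ t) := by
  simp [pvStep, List.flatMap_map, List.map_flatMap, List.map_map, Function.comp_def,
    pvAppend_push]

theorem pvStep_flatMap {α : Type} (l : List α) (g : α → List String) :
    pvStep (l.flatMap g) = l.flatMap (fun a => pvStep (g a)) := by
  simp [pvStep, List.flatMap_assoc]

theorem pvStep_tails (k : Nat) : pvStep (pvTails k) = pvTails (k + 1) := by
  induction k with
  | zero =>
    simp [pvStep, pvTails, List.flatMap, pvFlatten_map_singleton, pvEmpty_push]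
  | succ k ih =>
    calc pvStep (pvTails (k + 1))
        = pvSubChars.toList.flatMap (fun c => pvStep ((pvTails k).map (fun t => c.toString ++ t))) := by
          rw [pvTails, pvStep_flatMap]
      _ = pvSubChars.toList.flatMap (fun c => (pvStep (pvTails k)).map (fun t => c.toString ++ t)) := by
          simp only [pvStep_map]
      _ = pvTails (k + 2) := by rw [ih]; rfl

theorem pvIterate_step (m : Nat) :
    pvStep^[m] (pvFirstChars.toList.map (fun c => c.toString))
      = pvFirstChars.toList.flatMap (fun f => (pvTails m).map (fun t => f.toString ++ t)) := by
  induction m with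
  | zero => simp [pvTails, List.flatMap, pvFlatten_map_singleton]
  | succ m ih =>
    rw [Function.iterate_succ_apply', ih, pvStep_flatMap]
    simp only [pvStep_map, pvStep_tails]

theorem pvRange_length (n : Int) :
    (PySem.List.pyRange 1 n 1).length = (n - 1).toNat := by
  rw [PySem.List.length_pyRange_one]

-- ===== VERDICT (by name: the statement is the Claim_ definition above) =====
theorem generate_identifiers_spec : Claim_equal_generate_identifiers := by
  intro n _
  unfold Spec_generate_identifiers generate_identifiers generate_identifiers_alt
  split
  · rfl
  · have hfun : (fun (current : List String) (_ : Int) =>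
        current.foldl
          (fun next identifier =>
            pvSubChars.toList.foldl
              (fun next char => next ++ [identifier ++ char.toString]) next)
          []) = fun current _ => pvStep current := by
      funext L x
      simpa using pvOuter_foldl L []
    rw [hfun, pvFoldl_const_iterate, pvRange_length n, pvIterate_step]
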